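-- pv_equiv track=rewrite | github.com/Floozutter/aoc-2023-python | day13/main.py | ordered_reflections
-- ===== SOURCE A (Python) =====
-- from typing import Iterator, NamedTuple, Sequence
--
-- class Reflection(NamedTuple):
--     diff: int
--     i: int
--     vert: bool
--
-- def ordered_reflections(rows: Sequence[Sequence[bool]]) -> Sequence[Reflection]:
--     def row_reflections(rows: Sequence[Sequence[bool]], vert: bool) -> Iterator[Reflection]:
--         for i in range(len(rows)-1):
--             diff = sum(
--                 sum(a != b for a, b in zip(rows[i-n], rows[i+1+n]))
--                 for n in range(min(i+1, len(rows)-i-1))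
--             )
--             yield Reflection(diff, i, vert)
--     transposed = tuple(tuple(column) for column in zip(*rows))
--     reflections = (*row_reflections(rows, False), *row_reflections(transposed, True))
--     return tuple(sorted(reflections))
-- ===== SOURCE B (Python) =====
-- def ordered_reflections(rows):
--     # Reflection-line mismatches via an incrementally maintained reversed prefix
--     # zipped against the remaining suffix (no index arithmetic), then sorted.
--     def refs(rs, vert):
--         out = []
--         left = []                 # prefix; iterated newest-first via reversed()
--         right = list(rs)[::-1]    # suffix, reversed so the next row pops off the end
--         i = 0
--         while len(right) > 1:
--             left.append(right.pop())
--             diff = sum(x != y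
--                        for l, r in zip(reversed(left), reversed(right))
--                        for x, y in zip(l, r))
--             out.append((diff, i, vert))
--             i += 1
--         return out
--     width = min((len(r) for r in rows), default=0)
--     cols = [tuple(r[j] for r in rows) for j in range(width)]
--     return tuple(sorted(refs(rows, False) + refs(cols, True)))
-- ===== Notes on version B (the rewrite author's own statement) =====
-- stated objective: alternative
-- what changed: Replaces A's index-arithmetic scan (rows[i-n] vs rows[i+1+n] for each reflection line) by an incrementally maintained reversed prefix zipped against the remaining suffix, and replaces zip(*rows) transposition by column extraction over the minimum row length.
import Mathlib
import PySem

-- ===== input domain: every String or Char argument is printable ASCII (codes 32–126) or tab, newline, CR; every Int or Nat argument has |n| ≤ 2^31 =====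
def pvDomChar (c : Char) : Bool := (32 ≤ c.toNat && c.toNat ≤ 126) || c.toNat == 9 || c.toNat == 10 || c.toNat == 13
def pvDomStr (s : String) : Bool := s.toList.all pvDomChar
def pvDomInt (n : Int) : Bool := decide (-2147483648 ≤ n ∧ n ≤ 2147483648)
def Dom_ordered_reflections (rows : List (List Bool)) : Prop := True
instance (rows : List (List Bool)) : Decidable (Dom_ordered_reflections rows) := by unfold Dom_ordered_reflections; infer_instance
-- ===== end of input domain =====

-- B replaces A's index arithmetic by a reversed-prefix/suffix zip and zip(*) by
-- column extraction; objective: alternative decomposition (no speed claim).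

-- ===== PORT A =====
-- sum(a != b for a, b in zip(x, y))
def mismA (x y : List Bool) : Int :=
  (List.zip x y).foldl (fun s p => s + (if p.1 != p.2 then 1 else 0)) 0

-- the diff computed for reflection line i
def diffA (rs : List (List Bool)) (i : Nat) : Int :=
  (List.range (min (i + 1) (rs.length - i - 1))).foldl
    (fun s n => s + mismA (rs.getD (i - n) []) (rs.getD (i + 1 + n) [])) 0

-- row_reflections(rs, vert)  (indices are always in range, so getD's default is never used)
def reflA (rs : List (List Bool)) (vert : Bool) : List (Int × Int × Bool) :=
  (List.range (rs.length - 1)).map (fun i => (diffA rs i, (i : Int), vert))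

-- zip(*rows): take heads while every row is nonempty
def zipStar (rs : List (List Bool)) : List (List Bool) :=
  match rs with
  | [] => []
  | a :: t =>
    if h : (a :: t).all (fun r => !r.isEmpty) then
      ((a :: t).map (fun r => r.headD false)) :: zipStar ((a :: t).map List.tail)
    else []
termination_by (rs.headD []).length
decreasing_by
  simp only [List.headD_cons, List.map_cons]
  have ha : a ≠ [] := by
    have := (List.all_eq_true.mp h) a (by simp)
    simpa [List.isEmpty_iff] using this
  cases a with
  | nil => exact absurd rfl ha
  | cons x xs => simp

-- Python tuple '<' on (diff, i, vert), bool comparing as 0/1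
def pyLtRefl (a b : Int × Int × Bool) : Bool :=
  a.1 < b.1 || (a.1 == b.1 && (a.2.1 < b.2.1 || (a.2.1 == b.2.1 && (!a.2.2 && b.2.2))))

-- sorted(...) : Python's stable sort (PySem.List.sorted_eq_foldl_insertBy shape); shared by both ports
def pySortRefl (xs : List (Int × Int × Bool)) : List (Int × Int × Bool) :=
  xs.foldl (fun acc x => PySem.List.insertBy pyLtRefl x acc) []

def ordered_reflections (rows : List (List Bool)) : List (Int × Int × Bool) :=
  pySortRefl (reflA rows false ++ reflA (zipStar rows) true)

-- ===== PORT B =====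
-- flat sum: sum(x != y for l, r in zip(left, rest) for x, y in zip(l, r))
def diffB (left rest : List (List Bool)) : Int :=
  ((List.zip left rest).flatMap (fun p => List.zip p.1 p.2)).foldl
    (fun s q => s + (if q.1 != q.2 then 1 else 0)) 0

-- refs loop: move the head of the suffix onto the reversed prefix, emit the flat zip sum
def reflB (left : List (List Bool)) (rest : List (List Bool)) (i : Nat) (vert : Bool) :
    List (Int × Int × Bool) :=
  match rest with
  | r :: rest'@(_ :: _) =>
    (diffB (r :: left) rest', (i : Int), vert) :: reflB (r :: left) rest' (i + 1) vert
  | _ => []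

-- min((len(r) for r in rows), default=0)
def widthB (rows : List (List Bool)) : Nat := ((rows.map List.length).min?).getD 0

-- [tuple(r[j] for r in rows) for j in range(width)]
def colsB (rows : List (List Bool)) : List (List Bool) :=
  (List.range (widthB rows)).map (fun j => rows.map (fun r => r.getD j false))

def ordered_reflections_alt (rows : List (List Bool)) : List (Int × Int × Bool) :=
  pySortRefl (reflB [] rows 0 false ++ reflB [] (colsB rows) 0 true)

-- ===== PRECONDITION & SPEC =====
def Spec_ordered_reflections (rows : List (List Bool)) (out : List (Int × Int × Bool)) : Prop := out = ordered_reflections_alt rows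
instance (rows : List (List Bool)) (out : List (Int × Int × Bool)) : Decidable (Spec_ordered_reflections rows out) := by unfold Spec_ordered_reflections; infer_instance

-- ===== CLAIM (what is proved, stated in full; the proofs are below) =====
def Claim_equal_ordered_reflections : Prop := ∀ (rows : List (List Bool)), Dom_ordered_reflections rows → Spec_ordered_reflections rows (ordered_reflections rows)

-- ===== LEMMAS AND PROOFS =====
theorem headD_eq_getD (r : List Bool) : r.headD false = r.getD 0 false := by cases r <;> rfl
theorem tail_getD (r : List Bool) (j : Nat) : r.tail.getD j false = r.getD (j+1) false := by
  cases r <;> rfl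

theorem zipStar_eq_colsB (rs : List (List Bool)) : zipStar rs = colsB rs := by
  fun_induction zipStar rs with
  | case1 => simp [colsB, widthB]
  | case3 a t h =>
    simp only [List.all_eq_true, Bool.not_eq_eq_eq_not, Bool.not_true] at h
    push Not at h
    obtain ⟨r, hr, hre⟩ := h
    have hre' : r = [] := by rcases r with _ | _ <;> simp_all
    have h0 : (0 : Nat) ∈ (a :: t).map List.length :=
      List.mem_map.mpr ⟨r, hr, by simp [hre']⟩
    rcases hm : ((a :: t).map List.length).min? with _ | m
    · simp at hm
    · obtain ⟨hmem, hle⟩ := (List.min?_eq_some_iff.mp hm)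
      have hm0 : m = 0 := Nat.le_zero.mp (hle _ h0)
      have hw : widthB (a :: t) = 0 := by
        unfold widthB; rw [hm, hm0]; rfl
      simp [colsB, hw]
  | case2 a t h ih =>
    have hall : ∀ r ∈ a :: t, r ≠ [] := by
      intro r hr
      have := (List.all_eq_true.mp h) r hr
      simpa [List.isEmpty_iff] using this
    rcases hm : ((a :: t).map List.length).min? with _ | m
    · simp at hm
    obtain ⟨hmem, hle⟩ := (List.min?_eq_some_iff.mp hm)
    have hm1 : 1 ≤ m := by
      obtain ⟨r, hr, hrl⟩ := List.mem_map.mp hmem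
      have hne := hall r hr
      rcases r with _ | ⟨x, xs⟩
      · exact absurd rfl hne
      · simp at hrl; omega
    have hmt : (((a :: t).map List.tail).map List.length).min? = some (m - 1) := by
      apply List.min?_eq_some_iff.mpr
      constructor
      · obtain ⟨r, hr, hrl⟩ := List.mem_map.mp hmem
        exact List.mem_map.mpr ⟨r.tail, List.mem_map.mpr ⟨r, hr, rfl⟩,
          by simp [List.length_tail, hrl]⟩
      · intro b hb
        obtain ⟨rt, hrt, hbl⟩ := List.mem_map.mp hb
        obtain ⟨r, hr, hrl⟩ := List.mem_map.mp hrt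
        have h1 : m ≤ r.length := hle _ (List.mem_map.mpr ⟨r, hr, rfl⟩)
        subst hbl hrl
        simp [List.length_tail]
        omega
    have hw : widthB (a :: t) = m := by unfold widthB; rw [hm]; rfl
    have hwt : widthB ((a :: t).map List.tail) = m - 1 := by unfold widthB; rw [hmt]; rfl
    rw [ih]
    unfold colsB
    rw [hw, hwt]
    rcases m with _ | m'
    · omega
    rw [List.range_succ_eq_map, Nat.add_sub_cancel]
    simp only [List.map_cons, List.map_map, headD_eq_getD]
    congr 1
    apply List.map_congr_left
    intro j _
    simp [Function.comp_def, tail_getD, Nat.succ_eq_add_one]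


theorem foldl_add_sum {α : Type} (f : α → Int) (l : List α) (a : Int) :
    l.foldl (fun s x => s + f x) a = a + (l.map f).sum := by
  induction l generalizing a with
  | nil => simp
  | cons x t ih => simp [ih, add_assoc]

theorem mismA_eq_sum (x y : List Bool) :
    mismA x y = ((List.zip x y).map (fun q => if q.1 != q.2 then (1:Int) else 0)).sum := by
  unfold mismA
  rw [foldl_add_sum]; simp

theorem zipLR (rs : List (List Bool)) (i : Nat) (h : i < rs.length) :
    List.zip ((rs.take (i+1)).reverse) (rs.drop (i+1)) =
      (List.range (min (i+1) (rs.length - i - 1))).map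
        (fun n => (rs.getD (i-n) [], rs.getD (i+1+n) [])) := by
  apply List.ext_getElem
  · simp only [List.length_zip, List.length_reverse, List.length_take, List.length_drop,
      List.length_map, List.length_range]
    omega
  · intro n h1 h2
    have hm : n < min (i+1) (rs.length - i - 1) := by
      simp only [List.length_zip, List.length_reverse, List.length_take, List.length_drop] at h1
      omega
    have hb1 : i - n < rs.length := by omega
    have hb2 : i + 1 + n < rs.length := by omega
    simp only [List.getElem_zip, List.getElem_map, List.getElem_range, List.getElem_reverse,
      List.getElem_take, List.getElem_drop, List.getD_eq_getElem _ _ hb1,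
      List.getD_eq_getElem _ _ hb2]
    simp only [List.length_take]
    have hidx : min (i + 1) rs.length - 1 - n = i - n := by omega
    simp [hidx]

theorem sum_flatMap_int {α : Type} (f : α → List Int) (l : List α) :
    (l.flatMap f).sum = (l.map (fun a => (f a).sum)).sum := by
  induction l with
  | nil => rfl
  | cons x t ih => simp [List.flatMap_cons, List.sum_append, ih]

theorem diffB_eq_diffA (rs : List (List Bool)) (i : Nat) (h : i < rs.length) :
    diffB ((rs.take (i+1)).reverse) (rs.drop (i+1)) = diffA rs i := by
  unfold diffB diffA
  rw [zipLR rs i h, foldl_add_sum, foldl_add_sum, List.flatMap_map, List.map_flatMap,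
    sum_flatMap_int]
  simp [Function.comp_def, mismA_eq_sum]

theorem reflB_aux (rs : List (List Bool)) (vert : Bool) :
    ∀ (n i : Nat), rs.length - i ≤ n →
      reflB ((rs.take i).reverse) (rs.drop i) i vert
        = (List.range' i (rs.length - 1 - i)).map (fun j => (diffA rs j, (j : Int), vert)) := by
  intro n
  induction n with
  | zero =>
    intro i hi
    have hd : rs.drop i = [] := List.drop_eq_nil_of_le (by omega)
    have h0 : rs.length - 1 - i = 0 := by omega
    rw [hd, h0]
    simp [reflB]
  | succ n ih =>
    intro i hi
    cases hd : rs.drop i with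
    | nil =>
      have hlen : rs.length ≤ i := by
        have hl := List.length_drop (l := rs) (i := i)
        rw [hd] at hl
        simp at hl
        omega
      have h0 : rs.length - 1 - i = 0 := by omega
      rw [h0]
      simp [reflB]
    | cons r rest =>
      have hldrop := List.length_drop (l := rs) (i := i)
      rw [hd] at hldrop
      cases rest with
      | nil =>
        have h0 : rs.length - 1 - i = 0 := by simp at hldrop; omega
        rw [h0]
        simp [reflB]
      | cons r2 rest2 =>
        have hi_lt : i < rs.length := by simp at hldrop; omega
        have hr : r = rs[i] := by
          have h0 : (rs.drop i)[0]? = some r := by rw [hd]; rfl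
          rw [List.getElem?_drop] at h0
          simp only [Nat.add_zero] at h0
          exact ((List.getElem_eq_iff hi_lt).mpr h0).symm
        have htake : (rs.take (i+1)).reverse = r :: (rs.take i).reverse := by
          rw [List.take_succ, List.getElem?_eq_getElem hi_lt]
          simp [List.reverse_append, hr]
        have hdrop1 : rs.drop (i+1) = r2 :: rest2 := by
          rw [← List.tail_drop, hd]
          rfl
        rw [reflB]
        rw [← htake, ← hdrop1, diffB_eq_diffA rs i hi_lt, ih (i+1) (by omega)]
        have hcount : rs.length - 1 - i = (rs.length - 1 - (i+1)) + 1 := by simp at hldrop; omega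
        rw [hcount, List.range'_succ]
        simp

theorem reflB_eq_reflA (rs : List (List Bool)) (vert : Bool) :
    reflB [] rs 0 vert = reflA rs vert := by
  have := reflB_aux rs vert rs.length 0 (by omega)
  simpa [reflA, List.range_eq_range'] using this

-- ===== VERDICT (by name: the statement is the Claim_ definition above) =====
theorem ordered_reflections_spec : Claim_equal_ordered_reflections := by
  intro rows _
  unfold Spec_ordered_reflections ordered_reflections ordered_reflections_alt
  rw [reflB_eq_reflA, reflB_eq_reflA, zipStar_eq_colsB]
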